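-- pv_equiv track=rewrite | github.com/ZanderCow/MachineLearningVisualization | idk.py | snip_function
-- ===== SOURCE A (Python) =====
-- def snip_function(function_string):
--     for character in function_string:
--         if (character == '+') or (character == "-") or (function_string.index(character) == (len(function_string) - 1) ) :
--             index = function_string.index(character)
--             function_snippet = function_string[: index]
--             function_snippet.replace(" ","")
--             function_string = function_string[index: ]
--             return function_snippet , function_string
-- ===== SOURCE B (Python) =====
-- def snip_function(function_string):
--     # split index: the first '+' or '-'; if neither occurs, the last position
--     hits = [i for i in (function_string.find('+'), function_string.find('-')) if i != -1]
--     i = min(hits) if hits else len(function_string) - 1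
--     return function_string[:i], function_string[i:]
-- ===== Notes on version B (the rewrite author's own statement) =====
-- stated objective: simpler
-- what changed: B replaces A's per-character loop with its repeated str.index rescans by two str.find calls (first '+' and first '-', taking the smaller hit, defaulting to the last position) and one slice; Pre_ excludes only the inputs where A returns None (no value of the tuple type): the empty string and operator-free strings whose last character occurs earlier too.
-- outside the precondition, e.g. on snip_function(''): A returns None, B returns ('', ''); on snip_function('aba'): A returns None, B returns ('ab', 'a')
import Mathlib
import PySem

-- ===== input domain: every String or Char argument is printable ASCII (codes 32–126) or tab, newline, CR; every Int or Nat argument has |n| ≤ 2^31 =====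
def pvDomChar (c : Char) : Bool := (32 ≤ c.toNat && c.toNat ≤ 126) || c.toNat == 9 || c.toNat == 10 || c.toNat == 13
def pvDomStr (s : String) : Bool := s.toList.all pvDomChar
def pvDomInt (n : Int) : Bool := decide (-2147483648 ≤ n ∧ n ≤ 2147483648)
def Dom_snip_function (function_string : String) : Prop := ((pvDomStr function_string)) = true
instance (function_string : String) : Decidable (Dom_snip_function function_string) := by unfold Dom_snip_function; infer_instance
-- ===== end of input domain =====

-- B computes the split index with two str.find calls (first '+' or '-',
-- defaulting to the last position) and one slice, instead of A's per-character
-- loop with str.index rescans (objective: simpler).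

-- ===== PORT A =====
-- the loop 'for character in function_string: …'; the whole string is in scope for
-- '.index' / 'len'.  'function_string.index(character)' for a single character is
-- exactly the first occurrence of that character: PySem.List.index? (always some
-- here since the character is in the string).  The Python computes
-- 'function_snippet.replace(" ","")' and discards the result; the port omits that
-- dead expression.
def snipLoopA (l : List Char) : List Char → Option Nat
  | [] => none
  | c :: rest =>
      if c = '+' ∨ c = '-' ∨ PySem.List.index? l c = some (l.length - 1) then
        PySem.List.index? l c
      else snipLoopA l rest

-- Python A returns None when the loop falls through; those inputs are outside
-- Pre_snip_function and the port returns ("", "") there.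
def snip_function (function_string : String) : String × String :=
  match snipLoopA function_string.toList function_string.toList with
  | some k =>
      (String.ofList (PySem.List.slice function_string.toList none (some (k : Int))),
       String.ofList (PySem.List.slice function_string.toList (some (k : Int)) none))
  | none => ("", "")

-- ===== PORT B =====
-- Source B: hits = [i for i in (s.find('+'), s.find('-')) if i != -1];
-- i = min(hits) if hits else len(s) - 1; return s[:i], s[i:].
def snip_function_alt (function_string : String) : String × String :=
  match PySem.List.min? ([PySem.Chars.find function_string.toList ['+'],
      PySem.Chars.find function_string.toList ['-']].filter (fun x => x ≠ -1)) id with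
  | some i =>
      (String.ofList (PySem.List.slice function_string.toList none (some i)),
       String.ofList (PySem.List.slice function_string.toList (some i) none))
  | none =>
      (String.ofList (PySem.List.slice function_string.toList none
          (some ((function_string.toList.length : Int) - 1))),
       String.ofList (PySem.List.slice function_string.toList
          (some ((function_string.toList.length : Int) - 1)) none))

-- ===== PRECONDITION & SPEC =====
-- Pre_ excludes exactly the inputs on which Python A returns None (no value of
-- type String × String): the empty string, and operator-free strings whose last
-- character also occurs earlier.
def Pre_snip_function (function_string : String) : Prop :=
  '+' ∈ function_string.toList ∨ '-' ∈ function_string.toList ∨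
    (function_string.toList ≠ [] ∧
      function_string.toList.count (function_string.toList.getLast?.getD ' ') = 1)
instance (function_string : String) : Decidable (Pre_snip_function function_string) := by
  unfold Pre_snip_function; infer_instance

def pvWitness_snip_function : String := "3x+2"

def Spec_snip_function (function_string : String) (out : String × String) : Prop :=
  out = snip_function_alt function_string
instance (function_string : String) (out : String × String) : Decidable (Spec_snip_function function_string out) := by
  unfold Spec_snip_function; infer_instance

-- ===== CLAIM (what is proved, stated in full; the proofs are below) =====
def Claim_equal_snip_function : Prop := ∀ (function_string : String), Dom_snip_function function_string → Pre_snip_function function_string → Spec_snip_function function_string (snip_function function_string)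

-- ===== LEMMAS AND PROOFS =====

-- the split index A's loop computes, as a reference expression
def combIdx (l : List Char) : Option Nat :=
  match PySem.List.index? l '+', PySem.List.index? l '-' with
  | some a, some b => some (min a b)
  | some a, none => some a
  | none, some b => some b
  | none, none =>
      match l.getLast? with
      | some c =>
          if PySem.List.index? l c = some (l.length - 1) then some (l.length - 1)
          else none
      | none => none

theorem singleton_prefix_iff {c : Char} {t : List Char} : [c] <+: t ↔ t.head? = some c := by
  cases t with
  | nil => simp
  | cons x xs =>
      simp only [List.head?_cons, Option.some.injEq]
      constructor
      · rintro ⟨u, hu⟩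
        injection hu with h1 _
        exact h1.symm
      · rintro rfl; exact ⟨xs, rfl⟩

theorem find_singleton (l : List Char) (c : Char) :
    PySem.Chars.find l [c] =
      (match PySem.List.index? l c with
       | none => (-1 : Int)
       | some k => (k : Int)) := by
  cases h : PySem.List.index? l c with
  | none =>
      have hc : c ∉ l := (PySem.List.index?_eq_none_iff l c).mp h
      have hni : ¬ ([c] <:+: l) := fun hinf => hc ((List.singleton_infix_iff c l).mp hinf)
      simpa using (PySem.Chars.find_eq_neg_one_iff l [c]).mpr hni
  | some k =>
      obtain ⟨pre, suf, hl, hk, hpre⟩ := (PySem.List.index?_eq_some_iff l c k).mp h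
      have hmem : c ∈ l := by rw [hl]; simp
      have hnn : 0 ≤ PySem.Chars.find l [c] :=
        (PySem.Chars.find_nonneg_iff l [c]).mpr ((List.singleton_infix_iff c l).mpr hmem)
      obtain ⟨hfpre, hfmin⟩ := PySem.Chars.find_spec hnn
      set f := (PySem.Chars.find l [c]).toNat with hf
      have hfc : l[f]? = some c := by
        have := singleton_prefix_iff.mp hfpre
        rwa [List.head?_drop] at this
      have hkth : l[k]? = some c := by
        rw [hl, ← hk]; simp
      have hlow : ∀ i < k, l[i]? ≠ some c := by
        intro i hi hic
        have hik : i < pre.length := hk ▸ hi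
        have hpe : l[i]? = pre[i]? := by
          rw [hl]; exact (List.getElem?_append_left hik)
        rw [hpe] at hic
        obtain ⟨hlt, he⟩ := List.getElem?_eq_some_iff.mp hic
        exact hpre (he ▸ pre.getElem_mem hlt)
      have hfk : f = k := by
        rcases lt_trichotomy f k with hlt | he | hgt
        · exact absurd hfc (hlow f hlt)
        · exact he
        · exact absurd (singleton_prefix_iff.mpr (by rwa [List.head?_drop])) (hfmin k hgt)
      have hv : PySem.Chars.find l [c] = (k : Int) := by omega
      simp [hv]

theorem index?_append_not_mem {pre rest : List Char} {v : Char} (h : v ∉ pre) :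
    PySem.List.index? (pre ++ rest) v = (PySem.List.index? rest v).map (· + pre.length) := by
  induction pre with
  | nil => simp [Option.map_id']
  | cons x xs ih =>
      have hx : x ≠ v := by rintro rfl; simp at h
      have hxs : v ∉ xs := fun hv => h (List.mem_cons_of_mem _ hv)
      rw [List.cons_append, PySem.List.index?_cons_of_ne _ hx, ih hxs]
      cases PySem.List.index? rest v with
      | none => simp
      | some t => simp; omega

theorem index?_some_mem {l : List Char} {v : Char} {k : Nat}
    (h : PySem.List.index? l v = some k) : v ∈ l := by
  have := (PySem.List.index?_isSome_iff l v).mp (by rw [h]; rfl)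
  exact this

-- A's loop, characterised: scanning the suffix 'rest' of l, with no triggering
-- character in the processed prefix, yields combIdx l.
theorem loopA_eq (l : List Char) : ∀ (rest pre : List Char), l = pre ++ rest →
    (∀ c ∈ pre, ¬ (c = '+' ∨ c = '-' ∨ PySem.List.index? l c = some (l.length - 1))) →
    snipLoopA l rest = combIdx l := by
  intro rest
  induction rest with
  | nil =>
      intro pre hl H
      have hpre : pre = l := by simpa using hl.symm
      subst hpre
      have hplus : PySem.List.index? pre '+' = none := by
        rw [PySem.List.index?_eq_none_iff]
        intro hm; exact H '+' hm (Or.inl rfl)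
      have hminus : PySem.List.index? pre '-' = none := by
        rw [PySem.List.index?_eq_none_iff]
        intro hm; exact H '-' hm (Or.inr (Or.inl rfl))
      unfold snipLoopA combIdx
      rw [hplus, hminus]
      cases hg : pre.getLast? with
      | none => simp
      | some c =>
          have hcm : c ∈ pre := List.mem_of_getLast? hg
          simp only []
          rw [if_neg (fun hc => H c hcm (Or.inr (Or.inr hc)))]
  | cons c rest' ih =>
      intro pre hl H
      by_cases htrig : c = '+' ∨ c = '-' ∨ PySem.List.index? l c = some (l.length - 1)
      · -- the loop returns index? l c here; show it equals combIdx l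
        have hcpre : c ∉ pre := fun hm => H c hm htrig
        have hidxc : PySem.List.index? l c = some pre.length := by
          rw [hl, index?_append_not_mem hcpre, PySem.List.index?_cons_self]
          simp
        have hstep : snipLoopA l (c :: rest') = PySem.List.index? l c := by
          unfold snipLoopA; rw [if_pos htrig]
        rw [hstep, hidxc]
        rcases htrig with rfl | rfl | hlast
        · -- c = '+'
          unfold combIdx
          rw [hidxc]
          cases hm : PySem.List.index? l '-' with
          | none => simp
          | some b =>
              have hmpre : '-' ∉ pre := fun hmm => H '-' hmm (Or.inr (Or.inl rfl))
              have hgb : b ≥ pre.length := by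
                rw [hl, index?_append_not_mem hmpre] at hm
                cases h2 : PySem.List.index? ('+' :: rest') '-' with
                | none => rw [h2] at hm; simp at hm
                | some t => rw [h2] at hm; simp at hm; omega
              simp only [Option.some.injEq]
              omega
        · -- c = '-'
          unfold combIdx
          rw [hidxc]
          cases hp : PySem.List.index? l '+' with
          | none => simp
          | some a =>
              have hppre : '+' ∉ pre := fun hmm => H '+' hmm (Or.inl rfl)
              have hga : a ≥ pre.length := by
                rw [hl, index?_append_not_mem hppre] at hp
                cases h2 : PySem.List.index? ('-' :: rest') '+' with
                | none => rw [h2] at hp; simp at hp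
                | some t => rw [h2] at hp; simp at hp; omega
              simp only [Option.some.injEq]
              omega
        · -- first occurrence of c is the last position: c occurs only at the end
          have hpl : pre.length = l.length - 1 := by
            rw [hidxc] at hlast
            exact (Option.some.injEq _ _).mp hlast
          have hlen : l.length = pre.length + 1 + rest'.length := by
            rw [hl]; simp [List.length_append]; omega
          have hrest : rest' = [] := by
            have : rest'.length = 0 := by omega
            exact List.length_eq_zero_iff.mp this
          subst hrest
          have hl2 : l = pre ++ [c] := hl
          unfold combIdx
          cases hp : PySem.List.index? l '+' with
          | some a =>
              have hmem : '+' ∈ l := index?_some_mem hp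
              have hcp : c = '+' := by
                rw [hl2] at hmem
                rcases List.mem_append.mp hmem with hin | hin
                · exact absurd (Or.inl rfl) (H '+' hin)
                · exact (List.mem_singleton.mp hin).symm
              subst hcp
              rw [hidxc] at hp
              cases hm : PySem.List.index? l '-' with
              | none => simpa using hp
              | some b =>
                  have hmm : '-' ∈ l := index?_some_mem hm
                  rw [hl2] at hmm
                  rcases List.mem_append.mp hmm with hin | hin
                  · exact absurd (Or.inr (Or.inl rfl)) (H '-' hin)
                  · simp at hin
          | none =>
              cases hm : PySem.List.index? l '-' with
              | some b =>
                  have hmm : '-' ∈ l := index?_some_mem hm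
                  have hcm2 : c = '-' := by
                    rw [hl2] at hmm
                    rcases List.mem_append.mp hmm with hin | hin
                    · exact absurd (Or.inr (Or.inl rfl)) (H '-' hin)
                    · exact (List.mem_singleton.mp hin).symm
                  subst hcm2
                  rw [hidxc] at hm
                  simpa using hm
              | none =>
                  have hgl : l.getLast? = some c := by
                    rw [hl2]; exact List.getLast?_concat
                  rw [hgl]
                  simp only []
                  rw [if_pos (by rw [hidxc, hpl])]
                  rw [hpl]
      · -- no trigger: one more character into the prefix
        have hstep : snipLoopA l (c :: rest') = snipLoopA l rest' := by
          show (if c = '+' ∨ c = '-' ∨ PySem.List.index? l c = some (l.length - 1) then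
              PySem.List.index? l c else snipLoopA l rest') = snipLoopA l rest'
          rw [if_neg htrig]
        rw [hstep]
        refine ih (pre ++ [c]) (by rw [hl]; simp) ?_
        intro d hd
        rcases List.mem_append.mp hd with hd | hd
        · exact H d hd
        · simp at hd; subst hd; exact htrig

-- B's min-of-finds, expressed through index?
theorem min_filter_eq (l : List Char) :
    PySem.List.min? ([PySem.Chars.find l ['+'], PySem.Chars.find l ['-']].filter
        (fun x => x ≠ -1)) id =
    (match PySem.List.index? l '+', PySem.List.index? l '-' with
     | some a, some b => some ((min a b : Nat) : Int)
     | some a, none => some ((a : Nat) : Int)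
     | none, some b => some ((b : Nat) : Int)
     | none, none => none) := by
  rw [find_singleton l '+', find_singleton l '-']
  cases hp : PySem.List.index? l '+' with
  | some a =>
      cases hm : PySem.List.index? l '-' with
      | some b =>
          have h1 : ((a : Int) ≠ -1) := by omega
          have h2 : ((b : Int) ≠ -1) := by omega
          simp [PySem.List.min?, h1, h2]
          split_ifs with h <;> simp <;> omega
      | none =>
          have h1 : ((a : Int) ≠ -1) := by omega
          simp [PySem.List.min?, h1]
  | none =>
      cases hm : PySem.List.index? l '-' with
      | some b =>
          have h2 : ((b : Int) ≠ -1) := by omega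
          simp [PySem.List.min?, h2]
      | none => simp [PySem.List.min?, List.filter]

-- with no operator, a unique last character makes A's loop find the last position
theorem combIdx_noop (s : String)
    (hp' : PySem.List.index? s.toList '+' = none)
    (hm' : PySem.List.index? s.toList '-' = none)
    (hne : s.toList ≠ [])
    (hcnt : s.toList.count (s.toList.getLast?.getD ' ') = 1) :
    combIdx s.toList = some (s.toList.length - 1) := by
  obtain ⟨c, hg⟩ := Option.ne_none_iff_exists'.mp
    (fun h => hne (List.getLast?_eq_none_iff.mp h))
  have hsplit : s.toList = s.toList.dropLast ++ [c] := by
    conv_lhs => rw [← List.dropLast_append_getLast? c hg]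
  have hcnt' : s.toList.count c = 1 := by rwa [hg] at hcnt
  have hnotdl : c ∉ s.toList.dropLast := by
    intro hmem
    have h1 : 1 ≤ s.toList.dropLast.count c := List.one_le_count_iff.mpr hmem
    have h2 : s.toList.count c = s.toList.dropLast.count c + 1 := by
      rw [hsplit]; simp [List.count_append]
    omega
  have hidx : PySem.List.index? s.toList c = some (s.toList.length - 1) := by
    rw [hsplit, PySem.List.index?_append_singleton_self _ _ hnotdl]
    simp
  unfold combIdx
  rw [hp', hm', hg]
  simp only []
  rw [if_pos (by rw [hidx])]

-- ===== VERDICT (by name: the statement is the Claim_ definition above) =====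
theorem snip_function_spec : Claim_equal_snip_function := by
  intro s _ hpre
  unfold Spec_snip_function snip_function snip_function_alt
  rw [loopA_eq s.toList s.toList [] rfl (by simp), min_filter_eq]
  cases hp : PySem.List.index? s.toList '+' with
  | some a =>
      cases hm : PySem.List.index? s.toList '-' with
      | some b => unfold combIdx; rw [hp, hm]
      | none => unfold combIdx; rw [hp, hm]
  | none =>
      cases hm : PySem.List.index? s.toList '-' with
      | some b => unfold combIdx; rw [hp, hm]
      | none =>
          have hnp : '+' ∉ s.toList := (PySem.List.index?_eq_none_iff _ _).mp hp
          have hnm : '-' ∉ s.toList := (PySem.List.index?_eq_none_iff _ _).mp hm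
          rcases hpre with h | h | h
          · exact absurd h hnp
          · exact absurd h hnm
          · obtain ⟨hne, hcnt⟩ := h
            rw [combIdx_noop s hp hm hne hcnt]
            have hlenpos : 0 < s.toList.length := List.length_pos_iff.mpr hne
            have hcast : ((s.toList.length - 1 : Nat) : Int) = (s.toList.length : Int) - 1 := by
              omega
            simp only [hcast]
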